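-- pv_equiv track=rewrite | github.com/Matteo-Candi/Master-Thesis | benchmark/Python_formatted.py | cnt_rotations
-- ===== SOURCE A (Python) =====
-- def cnt_rotations(s, n):
--     s2 = s + s
--     pre = [0] * (2 * n)
--     for i in range(2 * n):
--         if i != 0:
--             pre[i] += pre[i - 1]
--         if s2 [i] == 'a' or s2 [i] == 'e' or s2 [i] == 'i' or s2 [i] == 'o' or s2 [i] == 'u':
--             pre[i] += 1
--     ans = 0
--     for i in range(n - 1, 2 * n - 1):
--         r, l = i, i - n
--         x1 = pre[r]
--         if l >= 0:
--             x1 -= pre[l]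
--         r = i - n // 2
--         left = pre[r]
--         if l >= 0:
--             left -= pre[l]
--         right = x1 - left
--         if left > right:
--             ans += 1
--     return ans
-- ===== SOURCE B (Python) =====
-- def cnt_rotations(s, n):
--     s2 = s + s
--     vowels = {'a', 'e', 'i', 'o', 'u'}
--     split = n - n // 2
--     ans = 0
--     for k in range(n):
--         left = 0
--         for j in range(k, k + split):
--             if s2[j] in vowels:
--                 left += 1
--         right = 0
--         for j in range(k + split, k + n):
--             if s2[j] in vowels:
--                 right += 1
--         if left > right:
--             ans += 1
--     return ans
-- ===== Notes on version B (the rewrite author's own statement) =====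
-- stated objective: simpler
-- what changed: Dropped A's prefix-sum table and its two index-arithmetic passes over the doubled string; B just walks each of the n rotation windows directly, counting vowels in the ceil(n/2)-length left half and the rest by explicit indexing.
import Mathlib
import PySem

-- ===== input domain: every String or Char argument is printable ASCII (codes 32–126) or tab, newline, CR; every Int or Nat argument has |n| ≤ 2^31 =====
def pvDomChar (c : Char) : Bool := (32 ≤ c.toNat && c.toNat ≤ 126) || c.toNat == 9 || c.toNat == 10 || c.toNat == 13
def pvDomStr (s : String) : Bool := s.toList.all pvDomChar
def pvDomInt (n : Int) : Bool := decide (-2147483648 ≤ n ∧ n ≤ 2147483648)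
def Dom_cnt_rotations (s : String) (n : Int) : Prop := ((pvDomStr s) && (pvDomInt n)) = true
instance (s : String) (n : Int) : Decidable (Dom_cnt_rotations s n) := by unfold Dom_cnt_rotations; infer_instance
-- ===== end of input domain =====

-- B replaces A's prefix-sum table by directly counting vowels in each rotation's two halves (simpler, no index bookkeeping).

-- ===== PORT A =====
def pvVowel (c : Char) : Bool := c == 'a' || c == 'e' || c == 'i' || c == 'o' || c == 'u'

-- body of A's first loop (builds the prefix-count table pre)
def pvStepA (s2 : List Char) (pre : List Int) (i : Int) : List Int :=
  let pre := if i ≠ 0 then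
      PySem.List.pySetD pre i (PySem.List.pyGetD pre i 0 + PySem.List.pyGetD pre (i - 1) 0)
    else pre
  if pvVowel (PySem.List.pyGetD s2 i ' ') then
    PySem.List.pySetD pre i (PySem.List.pyGetD pre i 0 + 1)
  else pre

-- body of A's second loop (tests one rotation via the prefix table)
def pvBodyA (pre : List Int) (n : Int) (ans : Int) (i : Int) : Int :=
  let r := i
  let l := i - n
  let x1 := PySem.List.pyGetD pre r 0
  let x1 := if l ≥ 0 then x1 - PySem.List.pyGetD pre l 0 else x1
  let r := i - PySem.Int.floordiv n 2
  let left := PySem.List.pyGetD pre r 0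
  let left := if l ≥ 0 then left - PySem.List.pyGetD pre l 0 else left
  let right := x1 - left
  if left > right then ans + 1 else ans

def cnt_rotations (s : String) (n : Int) : Int :=
  let s2 := s.toList ++ s.toList
  let pre := (PySem.List.pyRange 0 (2 * n) 1).foldl (pvStepA s2)
      (List.replicate (2 * n).toNat 0)
  (PySem.List.pyRange (n - 1) (2 * n - 1) 1).foldl (pvBodyA pre n) 0

-- ===== PORT B =====
def pvVowelSet : List Char := ['a', 'e', 'i', 'o', 'u']

-- B's inner loop: sum of 1 over j in range(a, b) with s2[j] a vowel
def pvCountB (s2 : List Char) (a b : Int) : Int :=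
  (PySem.List.pyRange a b 1).foldl
    (fun acc j => if pvVowelSet.contains (PySem.List.pyGetD s2 j ' ') then acc + 1 else acc) 0

-- body of B's loop over rotation starts
def pvBodyB (s2 : List Char) (n split : Int) (ans k : Int) : Int :=
  let left := pvCountB s2 k (k + split)
  let right := pvCountB s2 (k + split) (k + n)
  if left > right then ans + 1 else ans

def cnt_rotations_alt (s : String) (n : Int) : Int :=
  let s2 := s.toList ++ s.toList
  let split := n - PySem.Int.floordiv n 2
  (PySem.List.pyRange 0 n 1).foldl (pvBodyB s2 n split) 0

-- ===== PRECONDITION & SPEC =====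
-- Python A raises IndexError when n > len(s) (it indexes s+s at positions up to 2n-1); excluded here.
def Pre_cnt_rotations (s : String) (n : Int) : Prop := n ≤ PySem.Str.len s
instance (s : String) (n : Int) : Decidable (Pre_cnt_rotations s n) := by unfold Pre_cnt_rotations; infer_instance
def pvWitness_cnt_rotations : String × Int := ("leetcode", 4)

def Spec_cnt_rotations (s : String) (n : Int) (out : Int) : Prop := out = cnt_rotations_alt s n
instance (s : String) (n : Int) (out : Int) : Decidable (Spec_cnt_rotations s n out) := by unfold Spec_cnt_rotations; infer_instance

-- ===== CLAIM (what is proved, stated in full; the proofs are below) =====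
def Claim_equal_cnt_rotations : Prop := ∀ (s : String) (n : Int), Dom_cnt_rotations s n → Pre_cnt_rotations s n → Spec_cnt_rotations s n (cnt_rotations s n)

-- ===== LEMMAS AND PROOFS =====

-- number of vowels among the first k characters of s2 (out-of-range reads count as ' ')
def pvV (s2 : List Char) : Nat → Int
  | 0 => 0
  | k + 1 => pvV s2 k + (if pvVowel (s2.getD k ' ') then 1 else 0)
theorem pvV_succ (s2 : List Char) (k : Nat) :
    pvV s2 (k + 1) = pvV s2 k + (if pvVowel (s2.getD k ' ') then 1 else 0) := rfl

theorem set_map_range (N k : Nat) (g : Nat → Int) (v : Int) :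
    ((List.range N).map g).set k v = (List.range N).map (fun j => if j = k then v else g j) := by
  apply List.ext_getElem
  · simp
  · intro i h1 h2
    simp only [List.getElem_set, List.getElem_map, List.getElem_range]
    have : i < N := by simpa using h2
    by_cases h : i = k
    · subst h; simp
    · simp only [if_neg h, if_neg (fun hh : k = i => h hh.symm)]

theorem stepA_eq (s2 : List Char) (N k : Nat) (hk : k < N) :
    pvStepA s2 ((List.range N).map (fun j => if j < k then pvV s2 (j + 1) else 0)) (k : Int)
    = (List.range N).map (fun j => if j < k + 1 then pvV s2 (j + 1) else 0) := by
  unfold pvStepA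
  by_cases hk0 : k = 0
  · subst hk0
    simp only [Nat.cast_zero, ne_eq, not_true_eq_false, if_false]
    rw [show (0:Int) = ((0:Nat):Int) from by simp] at *
    simp only [PySem.List.pyGetD_natCast, PySem.List.pySetD_natCast]
    rw [PySem.List.getD_map_range _ _ _ _ hk, set_map_range]
    simp only [lt_irrefl, if_false]
    by_cases hv : pvVowel (s2.getD 0 ' ')
    · simp only [hv, if_true]
      apply List.map_congr_left
      intro j hj
      rcases Nat.eq_zero_or_pos j with rfl | hj0
      · rw [List.getD_eq_getElem?_getD] at hv
        simp [pvV, hv]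
      · simp [Nat.not_lt.mpr hj0]; try omega
    · simp only [hv]
      apply List.map_congr_left
      intro j hj
      rcases Nat.eq_zero_or_pos j with rfl | hj0
      · rw [List.getD_eq_getElem?_getD] at hv
        simp [pvV, hv]
      · simp [Nat.not_lt.mpr hj0]; try omega
  · obtain ⟨t, rfl⟩ : ∃ t, k = t + 1 := ⟨k - 1, by omega⟩
    have hne : ((t + 1 : Nat) : Int) ≠ 0 := by push_cast; try omega
    have hsub : ((t + 1 : Nat) : Int) - 1 = (t : Int) := by push_cast; ring
    simp only [hne, ne_eq, not_false_eq_true, if_true, hsub,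
      PySem.List.pyGetD_natCast, PySem.List.pySetD_natCast]
    rw [PySem.List.getD_map_range _ _ _ _ hk, PySem.List.getD_map_range _ _ _ _ (by omega : t < N)]
    simp only [lt_irrefl, if_false, Nat.lt_succ_self, if_true]
    rw [set_map_range]
    rw [PySem.List.getD_map_range _ _ _ _ hk]

    by_cases hv : pvVowel (s2.getD (t + 1) ' ')
    · simp only [hv, if_true]
      rw [set_map_range]
      apply List.map_congr_left
      intro j hj
      by_cases hjk : j = t + 1
      · subst hjk
        rw [List.getD_eq_getElem?_getD] at hv
        simp [pvV_succ, hv]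
      · simp only [hjk, if_false]
        by_cases h1 : j < t + 1 <;> simp [h1, show (j < t + 2) ↔ (j < t + 1 ∨ j = t + 1) by omega, hjk]
    · simp only [hv]
      apply List.map_congr_left
      intro j hj
      by_cases hjk : j = t + 1
      · subst hjk
        rw [List.getD_eq_getElem?_getD] at hv
        simp [pvV_succ, hv]
      · simp only [hjk, if_false]
        by_cases h1 : j < t + 1 <;> simp [h1, show (j < t + 2) ↔ (j < t + 1 ∨ j = t + 1) by omega, hjk]

theorem pvLoop1 (s2 : List Char) (N : Nat) :
    (PySem.List.pyRange 0 (2 * (N : Int)) 1).foldl (pvStepA s2)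
      (List.replicate (2 * (N : Int)).toNat 0)
    = (List.range (2 * N)).map (fun j => pvV s2 (j + 1)) := by
  have h2 : (2 * (N : Int)) = ((2 * N : Nat) : Int) := by push_cast; ring
  rw [h2, PySem.List.pyRange_one, List.foldl_map]
  simp only [sub_zero, Int.toNat_natCast, zero_add]
  have repl : List.replicate (2 * N) (0 : Int)
      = (List.range (2 * N)).map (fun j => if j < 0 then pvV s2 (j + 1) else 0) := by
    simp [List.map_const']
  rw [repl]
  have key : ∀ k, k ≤ 2 * N →
      (List.range k).foldl (fun p (j : Nat) => pvStepA s2 p (j : Int))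
        ((List.range (2 * N)).map (fun j => if j < 0 then pvV s2 (j + 1) else 0))
      = (List.range (2 * N)).map (fun j => if j < k then pvV s2 (j + 1) else 0) := by
    intro k
    induction k with
    | zero => intro _; rfl
    | succ k ih =>
      intro hk
      rw [List.range_succ, List.foldl_append, ih (by omega), List.foldl_cons, List.foldl_nil]
      exact stepA_eq s2 (2 * N) k (by omega)
  rw [key (2 * N) le_rfl]
  apply List.map_congr_left
  intro j hj
  rw [if_pos (List.mem_range.mp hj)]

theorem pvVowelSet_contains (c : Char) : pvVowelSet.contains c = pvVowel c := by
  simp [pvVowelSet, pvVowel, Bool.or_assoc, Bool.beq_eq_decide_eq]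
theorem pvCountB_eq (s2 : List Char) (a b : Nat) :
    pvCountB s2 (a : Int) ((a : Int) + (b : Int)) = pvV s2 (a + b) - pvV s2 a := by
  induction b with
  | zero => simp [pvCountB, PySem.List.pyRange_one_eq_nil]
  | succ b ih =>
    have h1 : ((a : Int) + ((b + 1 : Nat) : Int)) = ((a : Int) + (b : Int)) + 1 := by push_cast; ring
    unfold pvCountB
    rw [h1, PySem.List.pyRange_one_succ_right (by omega), List.foldl_append]
    unfold pvCountB at ih
    have h2 : ((a : Int) + (b : Int)) = ((a + b : Nat) : Int) := by push_cast; ring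
    rw [ih, List.foldl_cons, List.foldl_nil, h2, PySem.List.pyGetD_natCast,
      pvVowelSet_contains]
    show (if pvVowel (s2.getD (a+b) ' ') then pvV s2 (a + b) - pvV s2 a + 1 else pvV s2 (a + b) - pvV s2 a) = _
    rw [show a + (b+1) = (a+b) + 1 by ring]
    rw [pvV_succ]
    split <;> ring

theorem pvBody_eq (s2 : List Char) (m j : Nat) (hm : 1 ≤ m) (hj : j < m) (ans : Int) :
    pvBodyA ((List.range (2 * m)).map (fun j => pvV s2 (j + 1))) (m : Int) ans
      ((m : Int) - 1 + (j : Nat)) =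
    pvBodyB s2 (m : Int) ((m : Int) - PySem.Int.floordiv (m : Int) 2) ans (0 + (j : Nat)) := by
  have hsp : (m : Int) - PySem.Int.floordiv (m : Int) 2 = ((m - m / 2 : Nat) : Int) := by
    have hfd : PySem.Int.floordiv (m : Int) 2 = ((m / 2 : Nat) : Int) := by
      exact_mod_cast PySem.Int.floordiv_natCast m 2
    rw [hfd]; push_cast; omega
  have hi : ((m : Int) - 1 + (j : Nat)) = ((m - 1 + j : Nat) : Int) := by push_cast [hm]; omega
  -- A side
  have hA1 : PySem.List.pyGetD ((List.range (2 * m)).map (fun j => pvV s2 (j + 1))) ((m : Int) - 1 + (j : Nat)) 0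
      = pvV s2 (m + j) := by
    rw [hi, PySem.List.pyGetD_natCast, PySem.List.getD_map_range _ _ _ _ (by omega)]
    congr 1; omega
  have hA2 : PySem.List.pyGetD ((List.range (2 * m)).map (fun j => pvV s2 (j + 1)))
      ((m : Int) - 1 + (j : Nat) - PySem.Int.floordiv (m : Int) 2) 0 = pvV s2 (m - m / 2 + j) := by
    have : ((m : Int) - 1 + (j : Nat) - PySem.Int.floordiv (m : Int) 2) = ((m - 1 + j - m / 2 : Nat) : Int) := by
      have hfd : PySem.Int.floordiv (m : Int) 2 = ((m / 2 : Nat) : Int) := by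
        exact_mod_cast PySem.Int.floordiv_natCast m 2
      rw [hfd]; push_cast; omega
    rw [this, PySem.List.pyGetD_natCast, PySem.List.getD_map_range _ _ _ _ (by omega)]
    congr 1; omega
  simp only [pvBodyA, hA1, hA2]
  -- B side
  have hB1 : pvCountB s2 (0 + (j : Nat)) ((0 + (j : Nat)) + ((m : Int) - PySem.Int.floordiv (m : Int) 2))
      = pvV s2 (j + (m - m / 2)) - pvV s2 j := by
    rw [hsp, zero_add, pvCountB_eq]
  have hB2 : pvCountB s2 ((0 + (j : Nat)) + ((m : Int) - PySem.Int.floordiv (m : Int) 2)) ((0 + (j : Nat)) + (m : Int))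
      = pvV s2 (j + m) - pvV s2 (j + (m - m / 2)) := by
    rw [hsp, zero_add]
    have e1 : ((j : Nat) : Int) + ((m - m / 2 : Nat) : Int) = (((j + (m - m / 2)) : Nat) : Int) := by push_cast; ring
    have e2 : ((j : Nat) : Int) + (m : Int) = (((j + (m - m / 2)) : Nat) : Int) + (((m / 2) : Nat) : Int) := by
      push_cast; omega
    rw [e1, e2, pvCountB_eq]
    rw [show (j + (m - m / 2) + m / 2 : Nat) = (j + m : Nat) by omega]
  simp only [pvBodyB, hB1, hB2]
  -- conditions agree
  by_cases hj0 : j = 0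
  · subst hj0
    simp only [show ¬ ((m : Int) - 1 + ((0:Nat):Int) - (m : Int) ≥ 0) by push_cast; omega, if_false]
    have h0 : pvV s2 0 = 0 := rfl
    rw [show (0 + (m - m / 2) : Nat) = (m - m / 2 + 0 : Nat) by omega,
        show (0 + m : Nat) = (m + 0 : Nat) by omega, h0]
    generalize pvV s2 (m - m / 2 + 0) = a
    generalize pvV s2 (m + 0) = b
    have : (a > b - a) ↔ (a - 0 > b - a) := by omega
    rw [if_congr this rfl rfl]
  · have hge : ((m : Int) - 1 + ((j:Nat):Int) - (m : Int) ≥ 0) := by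
      have : 1 ≤ j := by omega
      omega
    simp only [hge, if_true]
    have hjj : PySem.List.pyGetD ((List.range (2 * m)).map (fun j => pvV s2 (j + 1)))
        ((m : Int) - 1 + (j : Nat) - (m : Int)) 0 = pvV s2 j := by
      have : ((m : Int) - 1 + (j : Nat) - (m : Int)) = ((j - 1 : Nat) : Int) := by omega
      rw [this, PySem.List.pyGetD_natCast, PySem.List.getD_map_range _ _ _ _ (by omega)]
      congr 1; omega
    rw [hjj]
    rw [show (j + (m - m / 2) : Nat) = (m - m / 2 + j : Nat) by omega,
        show (j + m : Nat) = (m + j : Nat) by omega]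
    generalize pvV s2 (m - m / 2 + j) = a
    generalize pvV s2 (m + j) = b
    generalize pvV s2 j = c
    have : (a - c > (b - c) - (a - c)) ↔ (a - c > b - a) := by omega
    rw [if_congr this rfl rfl]

theorem cnt_eq (s : String) (n : Int) : cnt_rotations s n = cnt_rotations_alt s n := by
  simp only [cnt_rotations, cnt_rotations_alt]
  by_cases hn : n ≤ 0
  · rw [show PySem.List.pyRange (n - 1) (2 * n - 1) = [] from PySem.List.pyRange_one_eq_nil (by omega),
        show PySem.List.pyRange 0 n = [] from PySem.List.pyRange_one_eq_nil (by omega)]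
    rfl
  · obtain ⟨m, rfl⟩ : ∃ m : Nat, n = (m : Int) := ⟨n.toNat, by omega⟩
    have hm : 1 ≤ m := by omega
    rw [pvLoop1 (s.toList ++ s.toList) m]
    rw [PySem.List.pyRange_one ((m : Int) - 1) (2 * (m : Int) - 1),
        PySem.List.pyRange_one 0 (m : Int), List.foldl_map, List.foldl_map]
    rw [show (2 * (m : Int) - 1 - ((m : Int) - 1)).toNat = m by omega,
        show ((m : Int) - 0).toNat = m by omega]
    apply PySem.List.foldl_congr_mem
    intro acc x hx
    exact pvBody_eq (s.toList ++ s.toList) m x hm (List.mem_range.mp hx) acc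

-- ===== VERDICT (by name: the statement is the Claim_ definition above) =====
theorem cnt_rotations_spec : Claim_equal_cnt_rotations := by
  intro s n _ _
  unfold Spec_cnt_rotations
  exact cnt_eq s n
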